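-- pv_equiv track=rewrite | github.com/DPNT-Sourcecode/CHK-qrkc01 | lib/solutions/CHK/checkout_solution.py | apply_group_discount
-- ===== SOURCE A (Python) =====
-- def apply_group_discount(items, prices, group_offer_details):
--     # Extract group offer details
--     group_items, (required_qty, group_price) = group_offer_details
--     eligible_items = [(item, items[item]) for item in group_items if item in items]
--
--     # Calculate how many times the offer can be applied
--     total_eligible_qty = sum(qty for _, qty in eligible_items)
--     offer_applications = total_eligible_qty // required_qty
--
--     discounted_price = 0
--     if offer_applications > 0:
--         # Apply the discount for as many sets as possible
--         discounted_price += offer_applications * group_price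
--
--         # Deduct the items, prioritizing cheaper items first
--         for _ in range(offer_applications * required_qty):
--             cheapest_item = min(eligible_items, key=lambda x: prices[x[0]])[0]
--             items[cheapest_item] -= 1
--             if items[cheapest_item] == 0:
--                 del items[cheapest_item]
--             # Update eligible_items for accurate min calculation
--             eligible_items = [(item, items[item]) for item in group_items if item in items]
--
--     return discounted_price, items
-- ===== SOURCE B (Python) =====
-- def apply_group_discount(items, prices, group_offer_details):
--     # Batch greedy: drain whole items cheapest-first instead of one unit per scan.
--     # Mutates `items` in place, like the original.
--     group_items, (required_qty, group_price) = group_offer_details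
--     total = sum(items[g] for g in group_items if g in items)
--     applications = total // required_qty
--     if applications <= 0:
--         return 0, items
--     remaining = applications * required_qty
--     pool = []
--     for g in group_items:
--         if g in items and g not in pool:
--             pool.append(g)
--     while remaining > 0 and pool:
--         g = min(pool, key=lambda x: prices[x])
--         take = min(items[g], remaining)
--         remaining -= take
--         if take == items[g]:
--             del items[g]
--             pool.remove(g)
--         else:
--             items[g] -= take
--     return applications * group_price, items
-- ===== Notes on version B (the rewrite author's own statement) =====
-- stated objective: alternative
-- what changed: A deducts one unit per loop iteration, rebuilding the eligible list and re-scanning it with min() every time; B computes the offer count the same way, then drains whole items at once, cheapest first, over a deduplicated pool, so the per-unit rebuild-and-scan loop disappears (cost independent of the quantities).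
import Mathlib
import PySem

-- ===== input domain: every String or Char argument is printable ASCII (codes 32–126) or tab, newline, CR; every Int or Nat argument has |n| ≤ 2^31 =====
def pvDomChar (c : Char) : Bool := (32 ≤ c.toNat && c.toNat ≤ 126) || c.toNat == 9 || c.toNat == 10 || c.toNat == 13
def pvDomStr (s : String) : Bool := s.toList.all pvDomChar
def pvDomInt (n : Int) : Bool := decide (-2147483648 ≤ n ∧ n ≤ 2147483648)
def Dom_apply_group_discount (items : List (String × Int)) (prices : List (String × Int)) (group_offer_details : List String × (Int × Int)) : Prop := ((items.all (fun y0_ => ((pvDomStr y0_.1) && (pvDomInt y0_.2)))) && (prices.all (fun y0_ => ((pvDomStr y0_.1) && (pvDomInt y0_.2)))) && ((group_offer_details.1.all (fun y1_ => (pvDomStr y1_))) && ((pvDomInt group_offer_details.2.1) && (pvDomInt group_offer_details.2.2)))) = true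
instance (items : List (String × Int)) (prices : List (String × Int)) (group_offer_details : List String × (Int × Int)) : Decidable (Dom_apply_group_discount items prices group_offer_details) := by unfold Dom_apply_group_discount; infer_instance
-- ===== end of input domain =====

-- B replaces A's one-unit-per-full-scan deduction loop by a batch greedy drain (whole item
-- per step); equivalence is about the RETURN value — both Pythons also mutate `items` in place
-- in the same way (the returned dict IS the mutated argument).

-- ===== PORT A =====
-- the names of group items currently present in the basket, in group order (with repetitions)
def pvNames (d : PySem.Dict String Int) (gs : List String) : List String :=
  gs.filter (fun g => d.contains g)

-- [(item, items[item]) for item in group_items if item in items]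
def pvElig (d : PySem.Dict String Int) (gs : List String) : List (String × Int) :=
  (pvNames d gs).map (fun g => (g, d.getD g 0))

-- the `for _ in range(...)` deduction loop of A (state: items dict + eligible_items list)
def pvALoop (gs : List String) (pd : PySem.Dict String Int) :
    Nat → PySem.Dict String Int × List (String × Int) → PySem.Dict String Int × List (String × Int)
  | 0, st => st
  | Nat.succ n, (d, e) =>
    match PySem.List.min? e (fun x => pd.getD x.1 0) with
    | none => (d, e)   -- Python: min([]) raises ValueError; excluded by Pre_
    | some m =>
      let d1 := d.modify m.1 0 (fun q => q - 1)
      let d2 := if d1.getD m.1 0 = 0 then d1.erase m.1 else d1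
      pvALoop gs pd n (d2, pvElig d2 gs)

def apply_group_discount (items : List (String × Int)) (prices : List (String × Int)) (group_offer_details : List String × (Int × Int)) : Int × (List (String × Int)) :=
  let d := PySem.Dict.mk items
  let pd := PySem.Dict.mk prices
  let gs := group_offer_details.1
  let required_qty := group_offer_details.2.1
  let group_price := group_offer_details.2.2
  let eligible_items := pvElig d gs
  let total_eligible_qty := (eligible_items.map (fun p => p.2)).sum
  let offer_applications := PySem.Int.floordiv total_eligible_qty required_qty  -- rq = 0: ZeroDivisionError, excluded by Pre_
  if 0 < offer_applications then
    let discounted_price := 0 + offer_applications * group_price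
    let res := pvALoop gs pd (offer_applications * required_qty).toNat (d, eligible_items)
    (discounted_price, res.1.items)
  else
    (0, d.items)

-- ===== PORT B =====
-- the while loop of B: drain the cheapest pooled item wholesale, cheapest first
def pvBDrain (pd : PySem.Dict String Int) (pool : List String) (remaining : Int)
    (d : PySem.Dict String Int) : PySem.Dict String Int :=
  if h : 0 < remaining ∧ pool ≠ [] then
    match hm : PySem.List.min? pool (fun x => pd.getD x 0) with
    | none => d   -- unreachable: pool ≠ []
    | some g =>
      let take := min (d.getD g 0) remaining
      if take = d.getD g 0 then
        -- pool.remove(g): g is the min of pool, hence present; remove of a present element is List.erase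
        pvBDrain pd (pool.erase g) (remaining - take) (d.erase g)
      else
        pvBDrain pd pool (remaining - take) (d.modify g 0 (fun q => q - take))
  else d
termination_by (pool.length, remaining.toNat)
decreasing_by
  · apply Prod.Lex.left
    have hg : g ∈ pool := PySem.List.min?_mem hm
    have h1 := List.length_erase_of_mem hg
    have h2 := List.length_pos_of_mem hg
    omega
  · apply Prod.Lex.right
    rename_i hne
    rcases min_choice (d.getD g 0) remaining with h1 | h1
    · exact absurd (by simpa [take] using h1) hne
    · omega

def apply_group_discount_alt (items : List (String × Int)) (prices : List (String × Int)) (group_offer_details : List String × (Int × Int)) : Int × (List (String × Int)) :=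
  let d := PySem.Dict.mk items
  let pd := PySem.Dict.mk prices
  let gs := group_offer_details.1
  let required_qty := group_offer_details.2.1
  let group_price := group_offer_details.2.2
  let total := ((pvNames d gs).map (fun g => d.getD g 0)).sum
  let applications := PySem.Int.floordiv total required_qty
  if applications ≤ 0 then
    (0, d.items)
  else
    let pool := gs.foldl (fun pool g => if d.contains g && !pool.contains g then pool ++ [g] else pool) []
    let res := pvBDrain pd pool (applications * required_qty) d
    (applications * group_price, res.items)

-- ===== PRECONDITION & SPEC =====
-- Pre_ excludes: association lists with duplicate keys (they do not represent a Python dict);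
-- required_qty = 0 (ZeroDivisionError in A); and, when the offer actually applies, baskets
-- holding an eligible item with a nonpositive quantity (a degenerate basket on which A's
-- decrement-and-delete drives counts negative and B's wholesale drain deletes the item — both
-- defensible, neither specified), a missing price for an eligible item (KeyError in A) and
-- deduction counts exceeding the distinct eligible stock (min([]) ValueError in A, reachable
-- only through repeated entries in group_items, which A double-counts).
def Pre_apply_group_discount (items : List (String × Int)) (prices : List (String × Int)) (group_offer_details : List String × (Int × Int)) : Prop :=
  let d := PySem.Dict.mk items
  let gs := group_offer_details.1
  let rq := group_offer_details.2.1
  let apps := PySem.Int.floordiv (((pvNames d gs).map (fun g => d.getD g 0)).sum) rq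
  (items.map Prod.fst).Nodup ∧ (prices.map Prod.fst).Nodup ∧ rq ≠ 0 ∧
  (0 < apps →
    (∀ g ∈ gs, d.contains g = true →
        1 ≤ d.getD g 0 ∧ (PySem.Dict.mk prices).contains g = true) ∧
    apps * rq ≤ ((PySem.List.dedup (pvNames d gs)).map (fun g => d.getD g 0)).sum)

instance (items : List (String × Int)) (prices : List (String × Int)) (group_offer_details : List String × (Int × Int)) : Decidable (Pre_apply_group_discount items prices group_offer_details) := by unfold Pre_apply_group_discount; infer_instance

def pvWitness_apply_group_discount : (List (String × Int)) × (List (String × Int)) × (List String × (Int × Int)) :=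
  ([("A", 3), ("B", 2)], [("A", 2), ("B", 1)], (["A", "B"], (3, 10)))

def Spec_apply_group_discount (items : List (String × Int)) (prices : List (String × Int)) (group_offer_details : List String × (Int × Int)) (out : Int × (List (String × Int))) : Prop := out = apply_group_discount_alt items prices group_offer_details
instance (items : List (String × Int)) (prices : List (String × Int)) (group_offer_details : List String × (Int × Int)) (out : Int × (List (String × Int))) : Decidable (Spec_apply_group_discount items prices group_offer_details out) := by unfold Spec_apply_group_discount; infer_instance

-- ===== CLAIM (what is proved, stated in full; the proofs are below) =====
def Claim_equal_apply_group_discount : Prop := ∀ (items : List (String × Int)) (prices : List (String × Int)) (group_offer_details : List String × (Int × Int)), Dom_apply_group_discount items prices group_offer_details → Pre_apply_group_discount items prices group_offer_details → Spec_apply_group_discount items prices group_offer_details (apply_group_discount items prices group_offer_details)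

-- ===== LEMMAS AND PROOFS =====

theorem pv_min?_map {α β : Type} (l : List α) (f : α → β) (k : β → Int) :
    PySem.List.min? (l.map f) k = (PySem.List.min? l (fun a => k (f a))).map f := by
  show List.foldl _ none _ = Option.map f (List.foldl _ none _)
  rw [show (none : Option β) = Option.map f none from rfl]
  generalize (none : Option α) = acc
  induction l generalizing acc with
  | nil => simp
  | cons x xs ih =>
    simp only [List.map_cons, List.foldl_cons]
    cases acc with
    | none => simpa using ih (some x)
    | some m =>
      by_cases h : k (f x) < k (f m)
      · simpa [h] using ih (some x)
      · simpa [h] using ih (some m)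

theorem pv_get?_erase {ν : Type} (d : PySem.Dict String ν) (k k' : String) :
    (d.erase k).get? k' = if k' = k then none else d.get? k' := by
  obtain ⟨l⟩ := d
  induction l with
  | nil => simp [PySem.Dict.erase, PySem.Dict.get?]
  | cons p rest ih =>
    simp only [PySem.Dict.erase, PySem.Dict.get?, List.filter_cons] at *
    by_cases hk : k' = k
    · subst hk
      by_cases hpk : p.1 = k' <;> simp_all [List.find?_cons, beq_iff_eq]
    · have hk2 : ¬ k = k' := fun h => hk h.symm
      by_cases hpk : p.1 = k <;> by_cases hpk' : p.1 = k' <;>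
        simp_all [List.find?_cons, beq_iff_eq]

theorem pv_contains_erase {ν : Type} (d : PySem.Dict String ν) (k k' : String) :
    (d.erase k).contains k' = (!(k' == k) && d.contains k') := by
  rw [PySem.Dict.contains_eq_isSome_get?, PySem.Dict.contains_eq_isSome_get?, pv_get?_erase]
  by_cases h : k' = k <;> simp [h]

theorem pv_getD_erase {ν : Type} (d : PySem.Dict String ν) (k k' : String) (v : ν) :
    (d.erase k).getD k' v = if k' = k then v else d.getD k' v := by
  simp only [PySem.Dict.getD, pv_get?_erase]
  by_cases h : k' = k <;> simp [h]

theorem pv_not_contains_all {ν : Type} (d : PySem.Dict String ν) (k : String)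
    (h : d.contains k = false) : ∀ p ∈ d.items, (p.1 == k) = false := by
  intro p hp
  by_contra hb
  have : (p.1 == k) = true := by revert hb; cases (p.1 == k) <;> simp
  have : d.contains k = true := by
    simp only [PySem.Dict.contains]
    exact List.any_eq_true.mpr ⟨p, hp, this⟩
  simp_all

theorem pv_insert_insert {ν : Type} (d : PySem.Dict String ν) (k : String) (v w : ν) :
    (d.insert k v).insert k w = d.insert k w := by
  apply PySem.Dict.ext
  rw [PySem.Dict.items_insert, if_pos (PySem.Dict.contains_insert_self d k v),
      PySem.Dict.items_insert, PySem.Dict.items_insert]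
  by_cases hc : d.contains k = true
  · rw [if_pos hc, if_pos hc, List.map_map]
    apply List.map_congr_left
    intro p _
    by_cases h : p.1 = k <;> simp [h]
  · rw [if_neg hc, if_neg hc, List.map_append]
    have : ∀ p ∈ d.items, (p.1 == k) = false :=
      pv_not_contains_all d k (by revert hc; cases d.contains k <;> simp)
    rw [List.map_congr_left (g := id) (fun p hp => by simp [this p hp])]
    simp

theorem pv_erase_insert {ν : Type} (d : PySem.Dict String ν) (k : String) (v : ν) :
    (d.insert k v).erase k = d.erase k := by
  apply PySem.Dict.ext
  show ((d.insert k v).items.filter _) = _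
  rw [PySem.Dict.items_insert]
  by_cases hc : d.contains k = true
  · rw [if_pos hc, List.filter_map]
    have hpred : ∀ p : String × ν,
        ((fun q => !q.1 == k) ∘ (fun p => if (p.1 == k) = true then (k, v) else p)) p
          = (fun q : String × ν => !q.1 == k) p := by
      intro p
      by_cases h : p.1 = k <;> simp [h]
    rw [List.filter_congr (fun p _ => hpred p)]
    have : ∀ p ∈ d.items.filter (fun q : String × ν => !q.1 == k), (p.1 == k) = false := by
      intro p hp
      have := List.of_mem_filter hp
      revert this; cases (p.1 == k) <;> simp
    rw [List.map_congr_left (g := id) (fun p hp => by simp [this p hp])]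
    simp [PySem.Dict.erase]
  · rw [if_neg hc, List.filter_append]
    simp [PySem.Dict.erase]

theorem pv_erase_modify {ν : Type} (d : PySem.Dict String ν) (k : String) (d0 : ν) (f : ν → ν) :
    (d.modify k d0 f).erase k = d.erase k := by
  show ((d.insert k _).erase k) = _
  exact pv_erase_insert d k _

theorem pv_modify_modify (d : PySem.Dict String Int) (k : String) (f g : Int → Int) :
    (d.modify k 0 f).modify k 0 g = d.modify k 0 (fun x => g (f x)) := by
  show (d.insert k (f (d.getD k 0))).insert k (g ((d.insert k (f (d.getD k 0))).getD k 0))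
      = d.insert k (g (f (d.getD k 0)))
  rw [PySem.Dict.getD_insert_self, pv_insert_insert]

-- filters commute

theorem pv_filter_comm {α : Type} (p q : α → Bool) (l : List α) :
    (l.filter q).filter p = (l.filter p).filter q := by
  rw [List.filter_filter, List.filter_filter]
  exact List.filter_congr (fun x _ => Bool.and_comm _ _)

theorem pv_dedup_filter (l : List String) (p : String → Bool) :
    PySem.List.dedup (l.filter p) = (PySem.List.dedup l).filter p := by
  simp only [PySem.List.dedup_eq_ofList]
  induction l with
  | nil => simp
  | cons x xs ih =>
    rw [List.filter_cons]
    by_cases hx : p x = true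
    · rw [if_pos hx, PySem.Set.ofList_cons, PySem.Set.ofList_cons, ih]
      show _ :: List.filter _ _ = List.filter p (x :: List.filter _ _)
      rw [List.filter_cons, if_pos hx, pv_filter_comm]
    · rw [if_neg hx, ih, PySem.Set.ofList_cons]
      show List.filter p _ = List.filter p (x :: _)
      rw [List.filter_cons, if_neg hx]
      show _ = List.filter p (List.filter _ _)
      rw [pv_filter_comm]
      have : ∀ y ∈ (PySem.Set.ofList xs).filter p, (!(y == x)) = true := by
        intro y hy
        have hyp := List.of_mem_filter hy
        have : ¬ y = x := fun h => by subst h; simp_all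
        simp [this]
      rw [List.filter_eq_self.mpr this]

theorem pv_pool_eq (d : PySem.Dict String Int) (gs : List String) :
    gs.foldl (fun pool g => if d.contains g && !pool.contains g then pool ++ [g] else pool) []
      = PySem.List.dedup (pvNames d gs) := by
  simp only [PySem.List.dedup_eq_ofList]
  induction gs using List.reverseRecOn with
  | nil => simp [pvNames]
  | append_singleton xs x ih =>
    rw [List.foldl_append, List.foldl_cons, List.foldl_nil, ih]
    show _ = PySem.Set.ofList (List.filter _ (xs ++ [x]))
    rw [List.filter_append, List.filter_cons]
    by_cases hc : d.contains x = true
    · rw [if_pos hc]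
      simp only [List.filter_nil]
      rw [PySem.Set.ofList_append_singleton, PySem.Set.add_eq_ite]
      by_cases hm : x ∈ PySem.Set.ofList (pvNames d xs)
      · have : List.contains (PySem.Set.ofList (pvNames d xs)) x = true :=
          List.contains_iff_mem.mpr hm
        simp [pvNames, hc, this, hm]
      · have : List.contains (PySem.Set.ofList (pvNames d xs)) x = false := by
          cases h2 : List.contains (PySem.Set.ofList (pvNames d xs)) x with
          | false => rfl
          | true => exact absurd (List.contains_iff_mem.mp h2) hm
        simp [pvNames, hc, this, hm]
    · rw [if_neg hc]
      have : d.contains x = false := by revert hc; cases d.contains x <;> simp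
      simp [pvNames, this]

theorem pv_names_modify (d : PySem.Dict String Int) (gs : List String) (g : String) (f : Int → Int)
    (hc : d.contains g = true) :
    pvNames (d.modify g 0 f) gs = pvNames d gs := by
  apply List.filter_congr
  intro x _
  rw [PySem.Dict.contains_modify]
  by_cases h : x = g
  · subst h; simp [hc]
  · simp [h]

theorem pv_names_erase (d : PySem.Dict String Int) (gs : List String) (g : String) :
    pvNames (d.erase g) gs = (pvNames d gs).filter (fun x => !(x == g)) := by
  show gs.filter _ = (gs.filter _).filter _
  rw [List.filter_filter]
  apply List.filter_congr
  intro x _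
  rw [pv_contains_erase]

theorem pv_sum_erase (pool : List String) (f : String → Int) (g : String)
    (hg : g ∈ pool) :
    (pool.map f).sum = f g + ((pool.erase g).map f).sum := by
  have := (List.perm_cons_erase hg).map f
  rw [this.sum_eq, List.map_cons, List.sum_cons]

theorem pv_min?_append (l : List String) (x : String) (k : String → Int) :
    PySem.List.min? (l ++ [x]) k =
      (match PySem.List.min? l k with
        | none => some x
        | some m => if k x < k m then some x else some m) := by
  show List.foldl _ none (l ++ [x]) = _
  rw [List.foldl_append, List.foldl_cons, List.foldl_nil]
  simp only [PySem.List.min?]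
  split <;> rename_i h <;> rw [h]

theorem pv_min?_dedup (l : List String) (k : String → Int) :
    PySem.List.min? (PySem.List.dedup l) k = PySem.List.min? l k := by
  simp only [PySem.List.dedup_eq_ofList]
  induction l using List.reverseRecOn with
  | nil => simp
  | append_singleton xs x ih =>
    rw [PySem.Set.ofList_append_singleton, PySem.Set.add_eq_ite]
    by_cases hm : x ∈ PySem.Set.ofList xs
    · rw [if_pos hm]
      have hx : x ∈ xs := (PySem.Set.mem_ofList xs x).mp hm
      have hne : xs ≠ [] := by rintro rfl; simp at hx
      obtain ⟨m, hmm⟩ : ∃ m, PySem.List.min? xs k = some m := by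
        cases h : PySem.List.min? xs k with
        | none => exact absurd ((PySem.List.min?_eq_none_iff xs k).mp h) hne
        | some m => exact ⟨m, rfl⟩
      have hle : k m ≤ k x := PySem.List.min?_isMin hmm x hx
      rw [pv_min?_append, hmm, ih, hmm]
      simp [not_lt.mpr hle]
    · rw [if_neg hm, pv_min?_append, pv_min?_append, ih]

theorem pv_bdrain_step (pd : PySem.Dict String Int) (pool : List String) (r : Int)
    (d : PySem.Dict String Int) (g : String) (hr : 0 < r)
    (hm : PySem.List.min? pool (fun x => pd.getD x 0) = some g) :
    pvBDrain pd pool r d =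
      if min (d.getD g 0) r = d.getD g 0 then
        pvBDrain pd (pool.erase g) (r - min (d.getD g 0) r) (d.erase g)
      else
        pvBDrain pd pool (r - min (d.getD g 0) r) (d.modify g 0 (fun q => q - min (d.getD g 0) r)) := by
  have hpool : pool ≠ [] := by
    rintro rfl
    rw [(PySem.List.min?_eq_none_iff ([] : List String) (fun x => pd.getD x 0)).mpr rfl] at hm
    cases hm
  rw [pvBDrain, dif_pos ⟨hr, hpool⟩]
  split
  · rename_i heq
    rw [heq] at hm; cases hm
  · rename_i g' heq
    have hg' : g = g' := by rw [heq] at hm; exact (Option.some.inj hm).symm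
    subst hg'
    rfl

theorem pv_bdrain_zero (pd : PySem.Dict String Int) (pool : List String)
    (d : PySem.Dict String Int) : pvBDrain pd pool 0 d = d := by
  rw [pvBDrain, dif_neg (by norm_num)]

-- one unit of B's batch drain: B satisfies A's unit-step recurrence

theorem pv_bdrain_unit (pd : PySem.Dict String Int) (pool : List String) (n : Nat)
    (d : PySem.Dict String Int) (g : String)
    (hm : PySem.List.min? pool (fun x => pd.getD x 0) = some g)
    (hq : 1 ≤ d.getD g 0) :
    pvBDrain pd pool ((n : Int) + 1) d =
      if d.getD g 0 = 1 then
        pvBDrain pd (pool.erase g) (n : Int) (d.erase g)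
      else
        pvBDrain pd pool (n : Int) (d.modify g 0 (fun q => q - 1)) := by
  rw [pv_bdrain_step pd pool _ d g (by omega) hm]
  by_cases hq1 : d.getD g 0 = 1
  · rw [if_pos hq1, hq1]
    rw [show min (1:Int) ((n:Int)+1) = 1 from min_eq_left (by omega)]
    rw [if_pos rfl]
    norm_num
  · rw [if_neg hq1]
    have hq2 : 2 ≤ d.getD g 0 := by omega
    by_cases hn : n = 0
    · subst hn
      rw [show min (d.getD g 0) (((0:Nat):Int)+1) = 1 from min_eq_right (by omega)]
      rw [if_neg (by omega)]
      norm_num [pv_bdrain_zero]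
    · have hn1 : 1 ≤ (n : Int) := by exact_mod_cast Nat.one_le_iff_ne_zero.mpr hn
      rw [pv_bdrain_step pd pool (n:Int) _ g (by omega) hm]
      rw [PySem.Dict.getD_modify_self]
      by_cases hqn : d.getD g 0 ≤ (n:Int) + 1
      · rw [show min (d.getD g 0) ((n:Int)+1) = d.getD g 0 from min_eq_left hqn]
        rw [if_pos rfl]
        rw [show min (d.getD g 0 - 1) (n:Int) = d.getD g 0 - 1 from min_eq_left (by omega)]
        rw [if_pos rfl]
        rw [pv_erase_modify]
        congr 1
        omega
      · rw [show min (d.getD g 0) ((n:Int)+1) = (n:Int)+1 from min_eq_right (by omega)]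
        rw [if_neg (by omega)]
        rw [show min (d.getD g 0 - 1) (n:Int) = (n:Int) from min_eq_right (by omega)]
        rw [if_neg (by omega)]
        rw [pv_modify_modify]
        rw [show (n:Int) + 1 - ((n:Int)+1) = 0 from by ring, show (n:Int) - (n:Int) = 0 from by ring]
        rw [pv_bdrain_zero, pv_bdrain_zero]
        congr 1
        funext x
        ring

theorem pv_aloop_min (d : PySem.Dict String Int) (gs : List String) (pd : PySem.Dict String Int)
    (g : String)
    (hm : PySem.List.min? (PySem.List.dedup (pvNames d gs)) (fun x => pd.getD x 0) = some g) :
    PySem.List.min? (pvElig d gs) (fun x => pd.getD x.1 0) = some (g, d.getD g 0) := by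
  rw [pv_min?_dedup] at hm
  show PySem.List.min? ((pvNames d gs).map (fun g => (g, d.getD g 0))) _ = _
  rw [pv_min?_map]
  have hkey : (fun a => (fun x : String × Int => pd.getD x.1 0) ((fun g => (g, d.getD g 0)) a))
      = (fun x => pd.getD x 0) := rfl
  rw [hkey, hm]
  rfl

theorem pv_aloop_succ (gs : List String) (pd : PySem.Dict String Int) (n : Nat)
    (d : PySem.Dict String Int) (g : String)
    (hm : PySem.List.min? (PySem.List.dedup (pvNames d gs)) (fun x => pd.getD x 0) = some g) :
    pvALoop gs pd (n + 1) (d, pvElig d gs) =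
      if d.getD g 0 = 1 then
        pvALoop gs pd n (d.erase g, pvElig (d.erase g) gs)
      else
        pvALoop gs pd n (d.modify g 0 (fun q => q - 1), pvElig (d.modify g 0 (fun q => q - 1)) gs) := by
  have hmin := pv_aloop_min d gs pd g hm
  simp only [pvALoop, hmin]
  simp only [PySem.Dict.getD_modify_self]
  by_cases hq1 : d.getD g 0 = 1
  · rw [if_pos (by omega), if_pos hq1, pv_erase_modify]
  · rw [if_neg (by omega), if_neg hq1]

theorem pv_drain_eq (gs : List String) (pd : PySem.Dict String Int) :
    ∀ (n : Nat) (d : PySem.Dict String Int),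
      (∀ x ∈ pvNames d gs, 1 ≤ d.getD x 0) →
      (n : Int) ≤ ((PySem.List.dedup (pvNames d gs)).map (fun g => d.getD g 0)).sum →
      (pvALoop gs pd n (d, pvElig d gs)).1
        = pvBDrain pd (PySem.List.dedup (pvNames d gs)) (n : Int) d := by
  intro n
  induction n with
  | zero => intro d _ _; simp [pvALoop, pv_bdrain_zero]
  | succ n ih =>
    intro d hqty hsum
    have hnodup : (PySem.List.dedup (pvNames d gs)).Nodup := by
      rw [PySem.List.dedup_eq_ofList]; exact PySem.Set.nodup_ofList _
    obtain ⟨g, hm⟩ : ∃ g, PySem.List.min? (PySem.List.dedup (pvNames d gs)) (fun x => pd.getD x 0) = some g := by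
      cases h : PySem.List.min? (PySem.List.dedup (pvNames d gs)) (fun x => pd.getD x 0) with
      | some g => exact ⟨g, rfl⟩
      | none =>
        have hnil := (PySem.List.min?_eq_none_iff _ _).mp h
        rw [hnil] at hsum
        simp at hsum
        omega
    have hgpool : g ∈ PySem.List.dedup (pvNames d gs) := PySem.List.min?_mem hm
    have hgl : g ∈ pvNames d gs := by
      rw [PySem.List.dedup_eq_ofList] at hgpool
      exact (PySem.Set.mem_ofList _ _).mp hgpool
    have hq : 1 ≤ d.getD g 0 := hqty g hgl
    have hc : d.contains g = true := (List.mem_filter.mp hgl).2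
    rw [pv_aloop_succ gs pd n d g hm]
    rw [show ((n + 1 : Nat) : Int) = (n : Int) + 1 from by push_cast; ring]
    rw [pv_bdrain_unit pd _ n d g hm hq]
    by_cases hq1 : d.getD g 0 = 1
    · rw [if_pos hq1, if_pos hq1]
      have hnames := pv_names_erase d gs g
      have hdedup : PySem.List.dedup (pvNames (d.erase g) gs)
          = (PySem.List.dedup (pvNames d gs)).erase g := by
        rw [hnames, pv_dedup_filter, List.Nodup.erase_eq_filter hnodup g]
        rfl
      have hqty' : ∀ x ∈ pvNames (d.erase g) gs, 1 ≤ (d.erase g).getD x 0 := by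
        intro x hx
        rw [hnames] at hx
        have hxl := List.mem_filter.mp hx
        have hxg : x ≠ g := by simpa using hxl.2
        rw [pv_getD_erase, if_neg hxg]
        exact hqty x hxl.1
      have hsum' : (n : Int) ≤
          ((PySem.List.dedup (pvNames (d.erase g) gs)).map (fun x => (d.erase g).getD x 0)).sum := by
        rw [hdedup]
        have e1 : (((PySem.List.dedup (pvNames d gs)).erase g).map (fun x => (d.erase g).getD x 0)).sum
            = (((PySem.List.dedup (pvNames d gs)).erase g).map (fun x => d.getD x 0)).sum := by
          apply congrArg List.sum
          apply List.map_congr_left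
          intro x hx
          have hxg : x ≠ g := (hnodup.mem_erase_iff.mp hx).1
          rw [pv_getD_erase, if_neg hxg]
        have e2 := pv_sum_erase (PySem.List.dedup (pvNames d gs)) (fun x => d.getD x 0) g hgpool
        push_cast at hsum
        rw [e1]
        beta_reduce at e2
        omega
      have hrec := ih (d.erase g) hqty' hsum'
      rw [hdedup] at hrec
      exact hrec
    · rw [if_neg hq1, if_neg hq1]
      have hnames := pv_names_modify d gs g (fun q => q - 1) hc
      have hqty' : ∀ x ∈ pvNames (d.modify g 0 (fun q => q - 1)) gs,
          1 ≤ (d.modify g 0 (fun q => q - 1)).getD x 0 := by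
        intro x hx
        rw [hnames] at hx
        rw [PySem.Dict.getD_modify]
        by_cases hxg : x = g
        · rw [if_pos hxg]; omega
        · rw [if_neg hxg]; exact hqty x hx
      have hsum' : (n : Int) ≤
          ((PySem.List.dedup (pvNames (d.modify g 0 (fun q => q - 1)) gs)).map
            (fun x => (d.modify g 0 (fun q => q - 1)).getD x 0)).sum := by
        rw [hnames]
        have e2 := pv_sum_erase (PySem.List.dedup (pvNames d gs)) (fun x => d.getD x 0) g hgpool
        have e3 := pv_sum_erase (PySem.List.dedup (pvNames d gs))
          (fun x => (d.modify g 0 (fun q => q - 1)).getD x 0) g hgpool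
        have e4 : (((PySem.List.dedup (pvNames d gs)).erase g).map
              (fun x => (d.modify g 0 (fun q => q - 1)).getD x 0)).sum
            = (((PySem.List.dedup (pvNames d gs)).erase g).map (fun x => d.getD x 0)).sum := by
          apply congrArg List.sum
          apply List.map_congr_left
          intro x hx
          have hxg : x ≠ g := (hnodup.mem_erase_iff.mp hx).1
          rw [PySem.Dict.getD_modify, if_neg hxg]
        have e5 : (d.modify g 0 (fun q => q - 1)).getD g 0 = d.getD g 0 - 1 :=
          PySem.Dict.getD_modify_self d g 0 _
        push_cast at hsum
        beta_reduce at e2 e3 e4 e5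
        omega
      have hrec := ih (d.modify g 0 (fun q => q - 1)) hqty' hsum'
      rw [hnames] at hrec
      exact hrec

theorem pv_spec (items : List (String × Int)) (prices : List (String × Int))
    (go : List String × (Int × Int))
    (hpre : Pre_apply_group_discount items prices go) :
    apply_group_discount items prices go = apply_group_discount_alt items prices go := by
  obtain ⟨hni, hnp, hrq, himp⟩ := hpre
  unfold apply_group_discount apply_group_discount_alt
  simp only []
  set d := PySem.Dict.mk items with hd
  set pd := PySem.Dict.mk prices with hpd
  set gs := go.1 with hgs
  set rq := go.2.1 with hrqd
  set gp := go.2.2 with hgp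
  have htot : (pvElig d gs).map (fun p => p.2) = (pvNames d gs).map (fun g => d.getD g 0) := by
    show ((pvNames d gs).map _).map _ = _
    rw [List.map_map]
    rfl
  rw [htot]
  set total := ((pvNames d gs).map (fun g => d.getD g 0)).sum with htotd
  set apps := PySem.Int.floordiv total rq with happs
  by_cases happ : 0 < apps
  · rw [if_pos happ, if_neg (by omega)]
    obtain ⟨hcond, hbound⟩ := himp happ
    have hqty : ∀ x ∈ pvNames d gs, 1 ≤ d.getD x 0 := by
      intro x hx
      have := List.mem_filter.mp hx
      exact (hcond x this.1 this.2).1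
    have htotnn : 0 ≤ total := by
      apply List.sum_nonneg
      intro y hy
      obtain ⟨x, hx, rfl⟩ := List.mem_map.mp hy
      exact le_trans (by omega) (hqty x hx)
    have hrqpos : 0 < rq := by
      rcases lt_trichotomy rq 0 with h | h | h
      · exfalso
        have hfd := PySem.Int.floordiv_mul_add_mod total rq
        have hmb := PySem.Int.mod_neg_bounds (a := total) h
        nlinarith
      · exact absurd h hrq
      · exact h
    have hn0 : 0 ≤ apps * rq := le_of_lt (mul_pos happ hrqpos)
    have hcast : (((apps * rq).toNat : Nat) : Int) = apps * rq := Int.toNat_of_nonneg hn0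
    have hdrain := pv_drain_eq gs pd (apps * rq).toNat d hqty (by rw [hcast]; exact hbound)
    rw [pv_pool_eq d gs]
    rw [← hcast]
    rw [← hdrain]
    rw [zero_add, Int.toNat_natCast]
  · rw [if_neg happ, if_pos (by omega)]

-- ===== VERDICT (by name: the statement is the Claim_ definition above) =====
theorem apply_group_discount_spec : Claim_equal_apply_group_discount := by
  intro items prices go _ hpre
  exact pv_spec items prices go hpre
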